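-- pv_equiv track=rewrite | github.com/LeandroAdeko/sudoku | sudoku_master.py | get_reversed_number_indexes
-- ===== SOURCE A (Python) =====
-- def get_reversed_number_indexes(num_idxs: dict[int,list[int]]):
--     rev_num_idx: dict[list[int], list[int]] = {}
--     for number, indexes_group in num_idxs.items():
--         idx_key = tuple(indexes_group)
--         if idx_key not in rev_num_idx:
--             rev_num_idx[idx_key] = []
--         rev_num_idx[idx_key].append(number)
--     return rev_num_idx
-- ===== SOURCE B (Python) =====
-- def get_reversed_number_indexes(num_idxs: dict[int, list[int]]):
--     # B: two declarative passes instead of mutable-dict accumulation.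
--     keys = list(dict.fromkeys(tuple(g) for g in num_idxs.values()))
--     return {k: [n for n, g in num_idxs.items() if tuple(g) == k] for k in keys}
-- ===== Notes on version B (the rewrite author's own statement) =====
-- stated objective: idiomatic
-- what changed: A accumulates into a mutable dict with setdefault-style membership tests in one pass; B first extracts the distinct group keys in first-occurrence order with dict.fromkeys and then builds the result in a dict comprehension whose values are filter comprehensions over the items.
import Mathlib
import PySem

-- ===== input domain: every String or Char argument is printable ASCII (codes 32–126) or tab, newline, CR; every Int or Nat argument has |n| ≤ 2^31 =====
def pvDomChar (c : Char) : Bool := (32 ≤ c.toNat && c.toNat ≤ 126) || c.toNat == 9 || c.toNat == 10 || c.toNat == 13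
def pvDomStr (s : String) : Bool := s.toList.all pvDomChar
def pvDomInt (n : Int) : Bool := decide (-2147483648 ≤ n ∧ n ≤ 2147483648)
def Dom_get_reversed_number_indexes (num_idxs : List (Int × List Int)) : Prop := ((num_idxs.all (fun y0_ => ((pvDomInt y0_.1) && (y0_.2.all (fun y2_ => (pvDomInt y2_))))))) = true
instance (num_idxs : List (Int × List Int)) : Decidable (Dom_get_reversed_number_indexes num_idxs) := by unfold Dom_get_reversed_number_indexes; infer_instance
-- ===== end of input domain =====

-- B replaces single-pass dict accumulation by distinct-key extraction plus one filtering pass per key (idiomatic, not faster).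


-- ===== PORT A =====
-- A: one pass; for each (number, group): ensure key present, then append number.
def stepA (d : PySem.Dict (List Int) (List Int)) (p : Int × List Int) :
    PySem.Dict (List Int) (List Int) :=
  let idx_key := p.2
  let d' := if d.contains idx_key then d else d.insert idx_key []
  d'.modify idx_key [] (fun v => v ++ [p.1])

def get_reversed_number_indexes (num_idxs : List (Int × List Int)) : List (List Int × List Int) :=
  (num_idxs.foldl stepA PySem.Dict.empty).items

-- ===== PORT B =====
-- B: distinct keys in first-occurrence order, then a filtering pass per key.
def get_reversed_number_indexes_alt (num_idxs : List (Int × List Int)) : List (List Int × List Int) :=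
  let keys := PySem.List.dedup (num_idxs.map (fun p => p.2))
  keys.map (fun k => (k, (num_idxs.filter (fun p => p.2 == k)).map (fun p => p.1)))

-- ===== PRECONDITION & SPEC =====
def Spec_get_reversed_number_indexes (num_idxs : List (Int × List Int)) (out : List (List Int × List Int)) : Prop := out = get_reversed_number_indexes_alt num_idxs
instance (num_idxs : List (Int × List Int)) (out : List (List Int × List Int)) : Decidable (Spec_get_reversed_number_indexes num_idxs out) := by unfold Spec_get_reversed_number_indexes; infer_instance

-- ===== CLAIM (what is proved, stated in full; the proofs are below) =====
def Claim_equal_get_reversed_number_indexes : Prop := ∀ (num_idxs : List (Int × List Int)), Dom_get_reversed_number_indexes num_idxs → Spec_get_reversed_number_indexes num_idxs (get_reversed_number_indexes num_idxs)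

-- ===== LEMMAS AND PROOFS =====

-- ===== VERDICT (by name: the statement is the Claim_ definition above) =====

theorem stepA_eq (d : PySem.Dict (List Int) (List Int)) (p : Int × List Int) :
    stepA d p = d.modify p.2 [] (fun v => v ++ [p.1]) := by
  unfold stepA
  by_cases h : d.contains p.2 = true
  · simp [h]
  · simp only [h, if_neg, Bool.not_eq_true]
    simp only [PySem.Dict.modify]
    rw [PySem.Dict.getD_insert_self, PySem.Dict.insert_insert_self,
        PySem.Dict.getD_of_not_contains d [] (Bool.not_eq_true _ ▸ h)]

theorem foldA_eq (num_idxs : List (Int × List Int)) :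
    num_idxs.foldl stepA PySem.Dict.empty
      = num_idxs.foldl (fun d p => PySem.Dict.modify d p.2 [] (fun v => v ++ [p.1])) PySem.Dict.empty := by
  rw [show stepA = (fun d p => PySem.Dict.modify d p.2 [] (fun v => v ++ [p.1])) from
    funext fun d => funext fun p => stepA_eq d p]

theorem get_reversed_number_indexes_spec : Claim_equal_get_reversed_number_indexes := by
  intro num_idxs _
  unfold Spec_get_reversed_number_indexes get_reversed_number_indexes get_reversed_number_indexes_alt
  rw [foldA_eq]
  have hnd : (num_idxs.foldl (fun d p => PySem.Dict.modify d p.2 [] (fun v => v ++ [p.1]))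
      PySem.Dict.empty).keys.Nodup :=
    PySem.Dict.nodup_keys_foldl_modify_key _ _ _ _ _ PySem.Dict.nodup_keys_empty
  rw [PySem.Dict.items_eq_map_keys _ hnd []]
  have hkeys : (num_idxs.foldl (fun d p => PySem.Dict.modify d p.2 [] (fun v => v ++ [p.1]))
      PySem.Dict.empty).keys = PySem.List.dedup (num_idxs.map (fun p => p.2)) := by
    rw [PySem.Dict.keys_foldl_modify_key]
    simp [PySem.Dict.keys_empty, PySem.List.dedup_eq_ofList, PySem.Set.update, PySem.Set.ofList]
  rw [hkeys]
  refine List.map_congr_left ?_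
  intro k _
  have hD : num_idxs.foldl (fun d p => PySem.Dict.modify d p.2 [] (fun v => v ++ [p.1]))
      PySem.Dict.empty
      = (num_idxs.map Prod.swap).foldl (fun d p => PySem.Dict.modify d p.1 [] (fun v => v ++ [p.2]))
        PySem.Dict.empty := by
    rw [List.foldl_map]
    rfl
  rw [hD, PySem.Dict.getD_foldl_modify_append]
  rw [List.filter_map, List.map_map]
  simp [PySem.Dict.getD_empty]
  rfl
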